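-- pv_equiv track=rewrite | github.com/avishekrwt/Exam-prep | greedyapproach.py | maxCoins
-- ===== SOURCE A (Python) =====
-- def maxCoins(A, B, T, N):
--     # code here
--     arr = list(zip(B,A))
--     arr.sort(reverse = True)
--
--     loot = 0
--     for coin,plate in arr:
--         if T == 0 :
--             break
--
--         taken = min(plate,T)
--
--         loot += coin*taken
--         T-=taken
--
--     return loot
-- ===== SOURCE B (Python) =====
-- def maxCoins(A, B, T, N):
--     # incremental extract-max: repeatedly take the best remaining (coin, plate)
--     # pair until the capacity T is used up, instead of sorting everything first.
--     items = list(zip(B, A))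
--     loot = 0
--     while items and T != 0:
--         coin, plate = max(items)
--         items.remove((coin, plate))
--         taken = min(plate, T)
--         loot += coin * taken
--         T -= taken
--     return loot
-- ===== Notes on version B (the rewrite author's own statement) =====
-- stated objective: alternative
-- what changed: Replaces sort-everything-then-scan with an incremental extract-max loop: repeatedly take the lexicographically best remaining (coin, plate) pair, remove it, and stop as soon as T is exhausted.
import Mathlib
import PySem

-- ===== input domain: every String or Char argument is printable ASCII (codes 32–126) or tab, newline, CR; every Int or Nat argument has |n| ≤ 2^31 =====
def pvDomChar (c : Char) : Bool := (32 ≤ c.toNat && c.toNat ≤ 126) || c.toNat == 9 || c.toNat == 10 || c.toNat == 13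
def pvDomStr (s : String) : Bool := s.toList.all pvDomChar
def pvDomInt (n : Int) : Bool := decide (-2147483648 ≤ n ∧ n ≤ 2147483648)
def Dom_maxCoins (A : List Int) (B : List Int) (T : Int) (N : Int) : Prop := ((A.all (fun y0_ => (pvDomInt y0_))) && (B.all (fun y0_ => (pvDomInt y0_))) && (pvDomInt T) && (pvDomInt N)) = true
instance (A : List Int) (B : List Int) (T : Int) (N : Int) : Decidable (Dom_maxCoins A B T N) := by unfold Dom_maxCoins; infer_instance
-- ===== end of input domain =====

-- B replaces sort-then-scan by an incremental extract-max loop (take the best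
-- remaining (coin,plate) pair, remove it, repeat until T is exhausted); objective: alternative.

-- ===== PORT A =====
-- the for-loop over the reverse-sorted pair list, with its 'if T == 0: break'
def pvLoopA : List (Int × Int) → Int → Int → Int
  | [], loot, _ => loot
  | p :: rest, loot, t =>
    if t = 0 then loot
    else pvLoopA rest (loot + p.1 * min p.2 t) (t - min p.2 t)

def maxCoins (A : List Int) (B : List Int) (T : Int) (N : Int) : Int :=
  pvLoopA (PySem.List.sorted2 (B.zip A) (fun p => p.1) (fun p => p.2) true) 0 T

-- ===== PORT B =====
-- the while-loop of Source B: fuel = initial length (each iteration removes one item);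
-- max(items) on pairs is the first lexicographic maximum, items.remove is PySem.List.remove?
def pvLoopB : Nat → List (Int × Int) → Int → Int → Int
  | 0, _, loot, _ => loot
  | n + 1, items, loot, t =>
    if t = 0 then loot
    else
      match PySem.List.max2? items (fun p => p.1) (fun p => p.2) with
      | none => loot            -- items empty: while-condition fails
      | some m =>
        match PySem.List.remove? items m with
        | none => loot          -- unreachable: the maximum is a member
        | some rest => pvLoopB n rest (loot + m.1 * min m.2 t) (t - min m.2 t)

def maxCoins_alt (A : List Int) (B : List Int) (T : Int) (N : Int) : Int :=
  pvLoopB (B.zip A).length (B.zip A) 0 T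

-- ===== PRECONDITION & SPEC =====
def Spec_maxCoins (A : List Int) (B : List Int) (T : Int) (N : Int) (out : Int) : Prop := out = maxCoins_alt A B T N
instance (A : List Int) (B : List Int) (T : Int) (N : Int) (out : Int) : Decidable (Spec_maxCoins A B T N out) := by unfold Spec_maxCoins; infer_instance

-- ===== CLAIM (what is proved, stated in full; the proofs are below) =====
def Claim_equal_maxCoins : Prop := ∀ (A : List Int) (B : List Int) (T : Int) (N : Int), Dom_maxCoins A B T N → Spec_maxCoins A B T N (maxCoins A B T N)

-- ===== LEMMAS AND PROOFS =====

-- reverse lexicographic order on (coin, plate) pairs: a is ≥ b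
def pvGe (a b : Int × Int) : Prop := b.1 < a.1 ∨ (b.1 = a.1 ∧ b.2 ≤ a.2)

-- the boolean strict-lex test used by sorted2 (reverse) and max2?
def pvLt (a b : Int × Int) : Bool :=
  decide (a.1 < b.1) || (!decide (b.1 < a.1) && decide (a.2 < b.2))

theorem pvLt_false_iff (a b : Int × Int) : pvLt a b = false ↔ pvGe a b := by
  simp [pvLt, pvGe]; omega

theorem pvLt_true_ge (a b : Int × Int) (h : pvLt a b = true) : pvGe b a := by
  simp [pvLt, pvGe] at *; omega

theorem pvGe_refl (a : Int × Int) : pvGe a a := by simp [pvGe]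

theorem pvGe_trans {a b c : Int × Int} (h1 : pvGe a b) (h2 : pvGe b c) : pvGe a c := by
  simp [pvGe] at *; omega

theorem pvGe_antisymm {a b : Int × Int} (h1 : pvGe a b) (h2 : pvGe b a) : a = b := by
  obtain ⟨a1, a2⟩ := a; obtain ⟨b1, b2⟩ := b
  simp [pvGe] at *; omega

-- running maximum of Source B's max(items)
def pvMaxf (m x : Int × Int) : Int × Int := if pvLt m x then x else m

theorem foldl_pvMaxf_spec (t : List (Int × Int)) : ∀ m : Int × Int,
    t.foldl pvMaxf m ∈ m :: t ∧ ∀ y ∈ m :: t, pvGe (t.foldl pvMaxf m) y := by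
  induction t with
  | nil => intro m; simp [pvGe_refl]
  | cons x t ih =>
    intro m
    obtain ⟨hmem, hge⟩ := ih (pvMaxf m x)
    have hfm : pvGe (pvMaxf m x) m := by
      by_cases h : pvLt m x = true
      · simpa [pvMaxf, h] using pvLt_true_ge m x h
      · simp [pvMaxf, h, pvGe_refl]
    have hfx : pvGe (pvMaxf m x) x := by
      by_cases h : pvLt m x = true
      · simp [pvMaxf, h, pvGe_refl]
      · have := (pvLt_false_iff m x).1 (by simpa using h)
        simpa [pvMaxf, h]
    have hr : pvGe (t.foldl pvMaxf (pvMaxf m x)) (pvMaxf m x) := hge _ (by simp)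
    constructor
    · simp only [List.foldl_cons]
      rw [List.mem_cons] at hmem
      rw [List.mem_cons, List.mem_cons]
      rcases hmem with h | h
      · by_cases hc : pvLt m x = true
        · right; left; rw [h]; simp [pvMaxf, hc]
        · left; rw [h]; simp [pvMaxf, hc]
      · right; right; exact h
    · intro y hy
      simp only [List.foldl_cons]
      rw [List.mem_cons, List.mem_cons] at hy
      rcases hy with rfl | rfl | hy
      · exact pvGe_trans hr hfm
      · exact pvGe_trans hr hfx
      · exact hge y (List.mem_cons_of_mem _ hy)

theorem max2?_foldl (t : List (Int × Int)) : ∀ (m : Int × Int),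
    PySem.List.max2? (m :: t) (fun p => p.1) (fun p => p.2) = some (t.foldl pvMaxf m) := by
  induction t with
  | nil => intro m; rfl
  | cons x t ih =>
    intro m
    have h1 : PySem.List.max2? (m :: x :: t) (fun p => p.1) (fun p => p.2)
        = PySem.List.max2? (pvMaxf m x :: t) (fun p => p.1) (fun p => p.2) := by
      by_cases hc : pvLt m x = true
      · have hc' : m.1 < x.1 ∨ m.1 ≤ x.1 ∧ m.2 < x.2 := by simp [pvLt] at hc; omega
        simp [PySem.List.max2?, pvMaxf, pvLt, List.foldl_cons]
        rw [if_pos hc', if_pos hc']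
      · have hc' : ¬(m.1 < x.1 ∨ m.1 ≤ x.1 ∧ m.2 < x.2) := by simp [pvLt] at hc; omega
        simp [PySem.List.max2?, pvMaxf, pvLt, List.foldl_cons]
        rw [if_neg hc', if_neg hc']
    rw [h1, ih, List.foldl_cons]

theorem max2?_spec (l : List (Int × Int)) (hne : l ≠ []) :
    ∃ m, PySem.List.max2? l (fun p => p.1) (fun p => p.2) = some m ∧ m ∈ l ∧ ∀ y ∈ l, pvGe m y := by
  cases l with
  | nil => exact absurd rfl hne
  | cons h t =>
    obtain ⟨hmem, hge⟩ := foldl_pvMaxf_spec t h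
    exact ⟨t.foldl pvMaxf h, max2?_foldl t h, hmem, hge⟩

-- items.remove(m) for a member m removes the first occurrence
theorem remove?_eq_erase (l : List (Int × Int)) (m : Int × Int) (hm : m ∈ l) :
    PySem.List.remove? l m = some (l.erase m) := by
  induction l with
  | nil => cases hm
  | cons x t ih =>
    by_cases hx : x = m
    · subst hx
      simp [PySem.List.remove?, List.idxOf?_cons, List.erase_cons]
    · have hm' : m ∈ t := by
        rcases List.mem_cons.mp hm with rfl | hmt
        · exact absurd rfl hx
        · exact hmt
      have := ih hm'
      simp only [PySem.List.remove?] at this ⊢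
      rcases hk : List.idxOf? m t with _ | k
      · simp [hk] at this
      · simp [hk] at this
        have hbeq : (x == m) = false := by simp [hx]
        simp [List.idxOf?_cons, hbeq, hk, List.erase_cons, hx, this]

-- the reverse sort used by port A, as an abbreviation for the proofs
def pvSortD (l : List (Int × Int)) : List (Int × Int) :=
  PySem.List.sorted2 l (fun p => p.1) (fun p => p.2) true

theorem pvSortD_perm (l : List (Int × Int)) : (pvSortD l).Perm l :=
  PySem.List.sorted2_perm l _ _ true

theorem insertBy_pairwise (x : Int × Int) (acc : List (Int × Int))
    (h : acc.Pairwise pvGe) :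
    (PySem.List.insertBy (fun a b => pvLt b a) x acc).Pairwise pvGe := by
  induction acc with
  | nil => simp [PySem.List.insertBy]
  | cons y ys ih =>
    rw [List.pairwise_cons] at h
    obtain ⟨hy, hys⟩ := h
    by_cases hc : pvLt y x = true
    · have hxy : pvGe x y := pvLt_true_ge y x hc
      simp only [PySem.List.insertBy, hc, if_pos]
      rw [List.pairwise_cons]
      refine ⟨?_, by rw [List.pairwise_cons]; exact ⟨hy, hys⟩⟩
      intro z hz
      rcases hz with _ | ⟨_, hz⟩
      · exact hxy
      · exact pvGe_trans hxy (hy z hz)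
    · have hyx : pvGe y x := (pvLt_false_iff y x).1 (by simpa using hc)
      simp only [PySem.List.insertBy, hc, Bool.false_eq_true, if_false]
      rw [List.pairwise_cons]
      refine ⟨?_, ih hys⟩
      intro z hz
      rw [PySem.List.mem_insertBy] at hz
      rcases hz with hz | hz
      · exact hz ▸ hyx
      · exact hy z hz

theorem pvSortD_pairwise (l : List (Int × Int)) : (pvSortD l).Pairwise pvGe := by
  suffices H : ∀ (l acc : List (Int × Int)), acc.Pairwise pvGe →
      (l.foldl (fun acc x => PySem.List.insertBy (fun a b => pvLt b a) x acc) acc).Pairwise pvGe by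
    have := H l [] (by simp)
    simpa [pvSortD, PySem.List.sorted2, pvLt] using this
  intro l
  induction l with
  | nil => intro acc h; simpa
  | cons x t ih =>
    intro acc h
    exact ih _ (insertBy_pairwise x acc h)

-- KEY: the reverse-sorted list decomposes as the lex maximum followed by the sort of the rest
theorem pvSortD_cons_max (l : List (Int × Int)) (m : Int × Int)
    (hm : m ∈ l) (hmax : ∀ y ∈ l, pvGe m y) :
    pvSortD l = m :: pvSortD (l.erase m) := by
  apply List.eq_of_perm_of_sorted (fun a b _ _ => fun h1 h2 => pvGe_antisymm h1 h2)
  · exact pvSortD_pairwise l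
  · rw [List.pairwise_cons]
    refine ⟨?_, pvSortD_pairwise _⟩
    intro z hz
    have : z ∈ l.erase m := (pvSortD_perm _).mem_iff.mp hz
    exact hmax z (List.mem_of_mem_erase this)
  · exact ((pvSortD_perm l).trans (List.perm_cons_erase hm)).trans
      ((pvSortD_perm (l.erase m)).symm.cons m)

-- main loop equivalence
theorem loop_equiv : ∀ (n : Nat) (l : List (Int × Int)) (loot t : Int), l.length ≤ n →
    pvLoopA (pvSortD l) loot t = pvLoopB n l loot t := by
  intro n
  induction n with
  | zero =>
    intro l loot t hlen
    have : l = [] := List.length_eq_zero_iff.mp (Nat.le_zero.mp hlen)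
    subst this
    rfl
  | succ n ih =>
    intro l loot t hlen
    cases l with
    | nil =>
      by_cases ht : t = 0 <;> simp [pvLoopB, pvSortD, PySem.List.sorted2, pvLoopA, PySem.List.max2?, ht]
    | cons h tl =>
      obtain ⟨m, hmax, hmem, hge⟩ := max2?_spec (h :: tl) (by simp)
      rw [pvSortD_cons_max (h :: tl) m hmem hge]
      simp only [pvLoopB, pvLoopA, hmax, remove?_eq_erase _ m hmem]
      by_cases ht : t = 0
      · simp [ht]
      · simp only [ht, if_neg, if_false]
        apply ih
        rw [List.length_erase_of_mem hmem]
        simp only [List.length_cons] at hlen ⊢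
        omega

-- ===== VERDICT (by name: the statement is the Claim_ definition above) =====
theorem maxCoins_spec : Claim_equal_maxCoins := by
  intro A B T N _
  unfold Spec_maxCoins maxCoins maxCoins_alt
  exact loop_equiv (B.zip A).length (B.zip A) 0 T (le_refl _)
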